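-- pv_equiv track=rewrite | github.com/horazont/aioxmpp | aioxmpp/structs.py | jid_unescape
-- ===== SOURCE A (Python) =====
-- ESCAPABLE_CODEPOINTS = " \"&'/:<>@"
--
-- def jid_unescape(localpart):
--     """
--     Un-escape a JID Escaped localpart.
--
--     .. seealso::
--
--         :func:`jid_escape`
--             for the reverse transformation
--
--     :param localpart: The escaped localpart
--     :type localpart: :class:`str`
--     :return: The unescaped localpart.
--     :rtype: :class:`str`
--
--     .. note::
--
--         JID Escaping does not allow embedding arbitrary characters in the
--         localpart. Only a defined subset of characters can be escaped.
--         Refer to :xep:`0106` for details.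
--     """
--     s = localpart
--
--     for cp in ESCAPABLE_CODEPOINTS:
--         s = s.replace("\\{:02x}".format(ord(cp)), cp)
--
--     for cp in ESCAPABLE_CODEPOINTS + "\\":
--         s = s.replace(
--             "\\5c{:02x}".format(ord(cp)),
--             "\\{:02x}".format(ord(cp)),
--         )
--
--     return s
-- ===== SOURCE B (Python) =====
-- ESCAPABLE_CODEPOINTS = " \"&'/:<>@"
--
-- _BARE = {"{:02x}".format(ord(c)): c for c in ESCAPABLE_CODEPOINTS}
-- _CODES = set(_BARE) | {"5c"}
--
--
-- def jid_unescape(localpart):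
--     """Un-escape a JID Escaped localpart (single left-to-right scan)."""
--     out = []
--     i = 0
--     n = len(localpart)
--     while i < n:
--         c = localpart[i]
--         if c != "\\":
--             out.append(c)
--             i += 1
--             continue
--         if localpart[i + 1:i + 3] == "5c" and localpart[i + 3:i + 5] in _CODES:
--             out.append("\\" + localpart[i + 3:i + 5])
--             i += 5
--         elif localpart[i + 1:i + 3] in _BARE:
--             out.append(_BARE[localpart[i + 1:i + 3]])
--             i += 3
--         else:
--             out.append("\\")
--             i += 1
--     return "".join(out)
-- ===== Notes on version B (the rewrite author's own statement) =====
-- stated objective: alternative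
-- what changed: A runs ~18 successive whole-string .replace passes (one per escapable codepoint, twice); B does a single left-to-right scan with a precomputed hex-code table, deciding at each backslash whether it starts a \5cXX escaped-backslash form, a bare \XX escape, or is literal.
import Mathlib
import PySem

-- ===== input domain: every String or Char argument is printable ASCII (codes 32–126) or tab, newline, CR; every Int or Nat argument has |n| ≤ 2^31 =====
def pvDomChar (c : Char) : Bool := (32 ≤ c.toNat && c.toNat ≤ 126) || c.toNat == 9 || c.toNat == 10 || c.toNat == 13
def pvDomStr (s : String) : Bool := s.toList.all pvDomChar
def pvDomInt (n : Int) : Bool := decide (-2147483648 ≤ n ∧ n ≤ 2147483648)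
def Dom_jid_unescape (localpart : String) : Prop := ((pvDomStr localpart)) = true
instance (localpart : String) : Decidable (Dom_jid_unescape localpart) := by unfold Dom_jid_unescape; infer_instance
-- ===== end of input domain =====

-- B replaces A's ~18 whole-string .replace passes by one left-to-right scan with a
-- table lookup (objective: alternative single-pass algorithm; same return value).

-- ===== PORT A =====
def escapableCodepoints : String := " \"&'/:<>@"

-- "{:02x}".format(n) for 0 ≤ n < 256 (exact there: two lowercase hex digits)
def hexDigit (n : Nat) : Char := if n < 10 then Char.ofNat (48 + n) else Char.ofNat (87 + n)
def fmt02x (n : Nat) : String := String.ofList [hexDigit (n / 16), hexDigit (n % 16)]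

def jid_unescape (localpart : String) : String :=
  let s := localpart
  let s := escapableCodepoints.toList.foldl
    (fun s cp => PySem.Str.replace s ("\\" ++ fmt02x cp.toNat) (String.ofList [cp])) s
  let s := (escapableCodepoints ++ "\\").toList.foldl
    (fun s cp => PySem.Str.replace s ("\\5c" ++ fmt02x cp.toNat) ("\\" ++ fmt02x cp.toNat)) s
  s

-- ===== PORT B =====
-- _BARE = {"{:02x}".format(ord(c)): c for c in ESCAPABLE_CODEPOINTS}
def bareTable : PySem.Dict (List Char) (List Char) :=
  escapableCodepoints.toList.foldl
    (fun d c => d.insert (fmt02x c.toNat).toList [c]) PySem.Dict.empty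

-- _CODES = set(_BARE) | {"5c"}
def codeSet : PySem.Set (List Char) :=
  PySem.Set.union (PySem.Set.ofList bareTable.keys) (PySem.Set.add PySem.Set.empty ("5c".toList))

-- the while loop of Source B: one scan over the characters
def scanGo (l : List Char) : List Char :=
  match l with
  | [] => []
  | c :: t =>
    if c = '\\' then
      if t.take 2 = ['5', 'c'] ∧ (t.drop 2).take 2 ∈ codeSet then
        '\\' :: ((t.drop 2).take 2 ++ scanGo (t.drop 4))
      else
        match PySem.Dict.get? bareTable (t.take 2) with
        | some r => r ++ scanGo (t.drop 2)
        | none => '\\' :: scanGo t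
    else c :: scanGo t
termination_by l.length
decreasing_by all_goals (simp [List.length_drop]; try omega)

def jid_unescape_alt (localpart : String) : String :=
  String.ofList (scanGo localpart.toList)

-- ===== PRECONDITION & SPEC =====
def Spec_jid_unescape (localpart : String) (out : String) : Prop := out = jid_unescape_alt localpart
instance (localpart : String) (out : String) : Decidable (Spec_jid_unescape localpart out) := by unfold Spec_jid_unescape; infer_instance

-- ===== CLAIM (what is proved, stated in full; the proofs are below) =====
def Claim_equal_jid_unescape : Prop := ∀ (localpart : String), Dom_jid_unescape localpart → Spec_jid_unescape localpart (jid_unescape localpart)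

-- ===== LEMMAS AND PROOFS =====

-- replF p r l = Chars.replace l p r for p ≠ [], with clean structural equations
def replF (p r : List Char) (l : List Char) : List Char :=
  match l with
  | [] => []
  | c :: t =>
    if p.isPrefixOf (c :: t) = true then r ++ replF p r (t.drop (p.length - 1))
    else c :: replF p r t
termination_by l.length
decreasing_by all_goals (simp [List.length_drop]; try omega)

lemma replF_nil (p r : List Char) : replF p r [] = [] := by rw [replF]

lemma replF_cons (p r : List Char) (c : Char) (t : List Char) :
    replF p r (c :: t) =
      if p.isPrefixOf (c :: t) = true then r ++ replF p r (t.drop (p.length - 1))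
      else c :: replF p r t := by
  rw [replF]

lemma go_nil (p r : List Char) (fuel : Nat) (acc : List Char) :
    PySem.Chars.replace.go p r fuel [] acc = acc.reverse := by
  cases fuel <;> simp [PySem.Chars.replace.go]

lemma go_cons (p r : List Char) (fuel : Nat) (c : Char) (t acc : List Char) :
    PySem.Chars.replace.go p r (fuel + 1) (c :: t) acc =
      if p.isPrefixOf (c :: t) = true then
        PySem.Chars.replace.go p r fuel (List.drop p.length (c :: t)) (r.reverse ++ acc)
      else PySem.Chars.replace.go p r fuel t (c :: acc) := by
  rw [PySem.Chars.replace.go]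

lemma go_eq (p r : List Char) (hp : p ≠ []) :
    ∀ fuel l acc, l.length ≤ fuel →
      PySem.Chars.replace.go p r fuel l acc = acc.reverse ++ replF p r l := by
  intro fuel
  induction fuel with
  | zero =>
    intro l acc h
    have : l = [] := by cases l <;> simp_all
    subst this; simp [go_nil, replF_nil]
  | succ n ih =>
    intro l acc h
    cases l with
    | nil => simp [go_nil, replF_nil]
    | cons c t =>
      rw [go_cons, replF_cons]
      obtain ⟨q, ps, hps⟩ := List.exists_cons_of_ne_nil hp
      by_cases hm : p.isPrefixOf (c :: t) = true
      · simp only [hm, if_pos]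
        rw [ih _ _ (by subst hps; simp at h ⊢; omega)]
        subst hps; simp [List.drop_succ_cons]
      · simp only [hm]
        rw [ih t (c :: acc) (by simp at h; omega)]
        simp

lemma replace_eq_replF (p r l : List Char) (hp : p ≠ []) :
    PySem.Chars.replace l p r = replF p r l := by
  have : p.isEmpty = false := by cases p <;> simp_all
  rw [PySem.Chars.replace]
  simp [this, go_eq p r hp l.length l [] (le_refl _)]

-- the A pipeline at list level
def stepF (s : List Char) (q : List Char × List Char) : List Char := replF q.1 q.2 s
def appF (ps : List (List Char × List Char)) (s : List Char) : List Char := ps.foldl stepF s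

def pats1 : List (List Char × List Char) :=
  [(['\\','2','0'], [' ']), (['\\','2','2'], ['"']), (['\\','2','6'], ['&']),
   (['\\','2','7'], ['\'']), (['\\','2','f'], ['/']), (['\\','3','a'], [':']),
   (['\\','3','c'], ['<']), (['\\','3','e'], ['>']), (['\\','4','0'], ['@'])]

def pats2 : List (List Char × List Char) :=
  [(['\\','5','c','2','0'], ['\\','2','0']), (['\\','5','c','2','2'], ['\\','2','2']),
   (['\\','5','c','2','6'], ['\\','2','6']), (['\\','5','c','2','7'], ['\\','2','7']),
   (['\\','5','c','2','f'], ['\\','2','f']), (['\\','5','c','3','a'], ['\\','3','a']),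
   (['\\','5','c','3','c'], ['\\','3','c']), (['\\','5','c','3','e'], ['\\','3','e']),
   (['\\','5','c','4','0'], ['\\','4','0']), (['\\','5','c','5','c'], ['\\','5','c'])]

lemma fmtL32 : (fmt02x 32).toList = ['2','0'] := by decide
lemma fmtL34 : (fmt02x 34).toList = ['2','2'] := by decide
lemma fmtL38 : (fmt02x 38).toList = ['2','6'] := by decide
lemma fmtL39 : (fmt02x 39).toList = ['2','7'] := by decide
lemma fmtL47 : (fmt02x 47).toList = ['2','f'] := by decide
lemma fmtL58 : (fmt02x 58).toList = ['3','a'] := by decide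
lemma fmtL60 : (fmt02x 60).toList = ['3','c'] := by decide
lemma fmtL62 : (fmt02x 62).toList = ['3','e'] := by decide
lemma fmtL64 : (fmt02x 64).toList = ['4','0'] := by decide
lemma fmtL92 : (fmt02x 92).toList = ['5','c'] := by decide
lemma ecpL : escapableCodepoints.toList = [' ','"','&','\'','/',':','<','>','@'] := by decide
lemma ecpL2 : (escapableCodepoints ++ "\\").toList = [' ','"','&','\'','/',':','<','>','@','\\'] := by decide

lemma A_bridge (s : String) :
    jid_unescape s = String.ofList (appF pats2 (appF pats1 s.toList)) := by
  have hrw : ∀ (l p r : List Char), p ≠ [] → PySem.Chars.replace l p r = replF p r l :=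
    fun l p r h => replace_eq_replF p r l h
  simp only [jid_unescape, ecpL, ecpL2, List.foldl, appF, stepF, pats1, pats2]
  simp [PySem.Str.replace, fmtL32, fmtL34, fmtL38, fmtL39, fmtL47, fmtL58, fmtL60,
    fmtL62, fmtL64, fmtL92, hrw]


-- tables and invariants used by the equivalence proof
def HX : List Char := ['0','2','3','4','5','6','7','a','c','e','f']
def T1c : List (List Char) :=
  [['2','0'],['2','2'],['2','6'],['2','7'],['2','f'],['3','a'],['3','c'],['3','e'],['4','0']]
def T2c : List (List Char) := T1c ++ [['5','c']]

def J1 (u : List Char) : Prop := ∀ cd ∈ T1c, ¬ cd <+: u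
def K2 (u : List Char) : Prop := ∀ cd ∈ T2c, ¬ ('5'::'c'::cd) <+: u

lemma bareTable_eq : bareTable = PySem.Dict.mk
  [(['2','0'],[' ']),(['2','2'],['"']),(['2','6'],['&']),(['2','7'],['\'']),(['2','f'],['/']),
   (['3','a'],[':']),(['3','c'],['<']),(['3','e'],['>']),(['4','0'],['@'])] := by decide

lemma codeSet_eq : codeSet = T2c := by decide

-- a replace whose replacement starts outside HX cannot create a 2-hex-digit prefix
lemma I1 (pp r' : List Char) (d x y : Char) (hd : d ∉ HX) (hx : x ∈ HX) (hy : y ∈ HX) :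
    ∀ u, ¬ [x,y] <+: u → ¬ [x,y] <+: replF ('\\'::pp) (d::r') u := by
  intro u h
  cases u with
  | nil => rw [replF_nil]; simp
  | cons c v =>
    rw [replF_cons]
    by_cases hm : ('\\'::pp).isPrefixOf (c :: v) = true
    · simp only [hm, if_true, List.cons_append]
      intro hpre
      rw [List.cons_prefix_cons] at hpre
      exact hd (hpre.1 ▸ hx)
    · simp only [hm, if_false, Bool.false_eq_true]
      intro hpre
      rw [List.cons_prefix_cons] at hpre
      obtain ⟨hxc, hpre2⟩ := hpre
      cases v with
      | nil => rw [replF_nil] at hpre2; simp at hpre2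
      | cons e w =>
        rw [replF_cons] at hpre2
        by_cases hm2 : ('\\'::pp).isPrefixOf (e :: w) = true
        · simp only [hm2, if_true, List.cons_append] at hpre2
          rw [List.cons_prefix_cons] at hpre2
          exact hd (hpre2.1 ▸ hy)
        · simp only [hm2, if_false, Bool.false_eq_true] at hpre2
          rw [List.cons_prefix_cons] at hpre2
          exact h (by simp [List.cons_prefix_cons, hxc, hpre2.1])

lemma T2c_shape : ∀ cd ∈ T2c, ∃ x y, cd = [x,y] ∧ x ∈ HX ∧ y ∈ HX := by
  intro cd hcd; fin_cases hcd <;> exact ⟨_, _, rfl, by decide, by decide⟩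

lemma T1c_shape : ∀ cd ∈ T1c, ∃ x y, cd = [x,y] ∧ x ∈ HX ∧ y ∈ HX := by
  intro cd hcd; fin_cases hcd <;> exact ⟨_, _, rfl, by decide, by decide⟩

lemma J1_preserve (pp r' : List Char) (d : Char) (hd : d ∉ HX) (u : List Char)
    (h : J1 u) : J1 (replF ('\\'::pp) (d::r') u) := by
  intro cd hcd
  obtain ⟨x, y, rfl, hx, hy⟩ := T1c_shape cd hcd
  exact I1 pp r' d x y hd hx hy u (h _ hcd)

lemma K2_preserve (pp r' : List Char) (d : Char) (hd : d ∉ HX) (u : List Char)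
    (h : K2 u) : K2 (replF ('\\'::pp) (d::r') u) := by
  intro cd hcd
  obtain ⟨x, y, rfl, hx, hy⟩ := T2c_shape cd hcd
  intro hpre
  cases u with
  | nil => rw [replF_nil] at hpre; simp at hpre
  | cons c v =>
    rw [replF_cons] at hpre
    by_cases hm : ('\\'::pp).isPrefixOf (c :: v) = true
    · simp only [hm, if_true, List.cons_append] at hpre
      rw [List.cons_prefix_cons] at hpre
      exact hd (hpre.1 ▸ (by decide : '5' ∈ HX))
    · simp only [hm, if_false, Bool.false_eq_true] at hpre
      rw [List.cons_prefix_cons] at hpre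
      obtain ⟨hc5, hpre2⟩ := hpre
      cases v with
      | nil => rw [replF_nil] at hpre2; simp at hpre2
      | cons e w =>
        rw [replF_cons] at hpre2
        by_cases hm2 : ('\\'::pp).isPrefixOf (e :: w) = true
        · simp only [hm2, if_true, List.cons_append] at hpre2
          rw [List.cons_prefix_cons] at hpre2
          exact hd (hpre2.1 ▸ (by decide : 'c' ∈ HX))
        · simp only [hm2, if_false, Bool.false_eq_true] at hpre2
          rw [List.cons_prefix_cons] at hpre2
          obtain ⟨hec, hpre3⟩ := hpre2
          have hK := h _ hcd
          rw [← hc5, ← hec] at hK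
          simp only [List.cons_prefix_cons, true_and] at hK
          exact I1 pp r' d x y hd hx hy w hK hpre3

-- pattern-shape facts for the two passes
def Good1 (q : List Char × List Char) : Prop :=
  ∃ cd d r', q.1 = '\\'::cd ∧ q.2 = d::r' ∧ cd ∈ T1c ∧ d ∉ HX
def Good2 (q : List Char × List Char) : Prop :=
  ∃ cd d r', q.1 = '\\'::'5'::'c'::cd ∧ q.2 = d::r' ∧ cd ∈ T2c ∧ d ∉ HX

lemma goods1 : ∀ q ∈ pats1, Good1 q := by
  intro q hq; fin_cases hq <;> exact ⟨_, _, _, rfl, rfl, by decide, by decide⟩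

lemma goods2 : ∀ q ∈ pats2, Good2 q := by
  intro q hq; fin_cases hq <;> exact ⟨_, _, _, rfl, rfl, by decide, by decide⟩

lemma appF1_commute : ∀ ps, (∀ q ∈ ps, Good1 q) → ∀ u, J1 u → K2 u →
    appF ps ('\\'::u) = '\\' :: appF ps u ∧ J1 (appF ps u) ∧ K2 (appF ps u) := by
  intro ps
  induction ps with
  | nil => intro _ u h1 h2; exact ⟨rfl, h1, h2⟩
  | cons q ps ih =>
    intro hps u h1 h2
    obtain ⟨cd, d, r', hq1, hq2, hcd, hd⟩ := hps q (by simp)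
    obtain ⟨x, y, rfl, hx, hy⟩ := T1c_shape cd hcd
    have hnm : ¬ ('\\'::[x,y]).isPrefixOf ('\\'::u) = true := by
      rw [List.isPrefixOf_iff_prefix, List.cons_prefix_cons]
      exact fun hpre => h1 _ hcd hpre.2
    have hstep : stepF ('\\'::u) q = '\\' :: stepF u q := by
      simp only [stepF, hq1, hq2]
      rw [replF_cons]
      simp [hnm]
    have h1' : J1 (stepF u q) := by
      simp only [stepF, hq1, hq2]; exact J1_preserve _ _ _ hd _ h1
    have h2' : K2 (stepF u q) := by
      simp only [stepF, hq1, hq2]; exact K2_preserve _ _ _ hd _ h2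
    have := ih (fun q hq => hps q (by simp [hq])) (stepF u q) h1' h2'
    refine ⟨?_, this.2.1, this.2.2⟩
    simp only [appF, List.foldl] at this ⊢
    rw [hstep]
    exact this.1

lemma appF2_commute : ∀ ps, (∀ q ∈ ps, Good2 q) → ∀ u, K2 u →
    appF ps ('\\'::u) = '\\' :: appF ps u := by
  intro ps
  induction ps with
  | nil => intro _ u _; rfl
  | cons q ps ih =>
    intro hps u h2
    obtain ⟨cd, d, r', hq1, hq2, hcd, hd⟩ := hps q (by simp)
    have hnm : ¬ ('\\'::'5'::'c'::cd).isPrefixOf ('\\'::u) = true := by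
      rw [List.isPrefixOf_iff_prefix, List.cons_prefix_cons]
      exact fun hpre => h2 _ hcd hpre.2
    have hstep : stepF ('\\'::u) q = '\\' :: stepF u q := by
      simp only [stepF, hq1, hq2]
      rw [replF_cons]
      simp [hnm]
    have h2' : K2 (stepF u q) := by
      obtain ⟨x, y, rfl, _, _⟩ := T2c_shape cd hcd
      simp only [stepF, hq1, hq2]
      exact K2_preserve _ _ _ hd _ h2
    have := ih (fun q hq => hps q (by simp [hq])) (stepF u q) h2'
    simp only [appF, List.foldl] at this ⊢
    rw [hstep]
    exact this

lemma appF_cons_ne : ∀ ps, (∀ q ∈ ps, Good1 q ∨ Good2 q) → ∀ (c : Char) u, c ≠ '\\' →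
    appF ps (c::u) = c :: appF ps u := by
  intro ps
  induction ps with
  | nil => intro _ c u _; rfl
  | cons q ps ih =>
    intro hps c u hc
    have hhd : ∃ pp, q.1 = '\\'::pp := by
      rcases hps q (by simp) with ⟨cd, d, r', hq1, _⟩ | ⟨cd, d, r', hq1, _⟩
      · exact ⟨cd, hq1⟩
      · exact ⟨'5'::'c'::cd, hq1⟩
    obtain ⟨pp, hq1⟩ := hhd
    have hnm : ¬ ('\\'::pp).isPrefixOf (c::u) = true := by
      rw [List.isPrefixOf_iff_prefix, List.cons_prefix_cons]
      exact fun hpre => hc hpre.1.symm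
    have hstep : stepF (c::u) q = c :: stepF u q := by
      simp only [stepF, hq1]
      rw [replF_cons]
      simp [hnm]
    have := ih (fun q hq => hps q (by simp [hq])) c (stepF u q) hc
    simp only [appF, List.foldl] at this ⊢
    rw [hstep]
    exact this

lemma goods12 : ∀ q ∈ pats1, Good1 q ∨ Good2 q := fun q hq => Or.inl (goods1 q hq)
lemma goods22 : ∀ q ∈ pats2, Good1 q ∨ Good2 q := fun q hq => Or.inr (goods2 q hq)

lemma bare_get (q r : List Char) (h : PySem.Dict.get? bareTable q = some r) :
    (q = ['2','0'] ∧ r = [' ']) ∨ (q = ['2','2'] ∧ r = ['"']) ∨ (q = ['2','6'] ∧ r = ['&']) ∨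
    (q = ['2','7'] ∧ r = ['\'']) ∨ (q = ['2','f'] ∧ r = ['/']) ∨ (q = ['3','a'] ∧ r = [':']) ∨
    (q = ['3','c'] ∧ r = ['<']) ∨ (q = ['3','e'] ∧ r = ['>']) ∨ (q = ['4','0'] ∧ r = ['@']) := by
  rw [bareTable_eq] at h
  simp only [PySem.Dict.get?_mk_cons, beq_iff_eq] at h
  split_ifs at h <;> simp_all [PySem.Dict.get?]

lemma stepB20 (rest : List Char) :
    appF pats2 (appF pats1 ('\\'::'5'::'c'::'2'::'0'::rest)) = '\\'::'2'::'0'::appF pats2 (appF pats1 rest) := by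
  simp only [appF, stepF, pats1, pats2, List.foldl]; simp [replF_cons, List.isPrefixOf]

lemma scanB20 (rest : List Char) :
    scanGo ('\\'::'5'::'c'::'2'::'0'::rest) = '\\'::'2'::'0'::scanGo rest := by
  rw [scanGo]; simp [codeSet_eq, T2c, T1c]

lemma stepB22 (rest : List Char) :
    appF pats2 (appF pats1 ('\\'::'5'::'c'::'2'::'2'::rest)) = '\\'::'2'::'2'::appF pats2 (appF pats1 rest) := by
  simp only [appF, stepF, pats1, pats2, List.foldl]; simp [replF_cons, List.isPrefixOf]

lemma scanB22 (rest : List Char) :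
    scanGo ('\\'::'5'::'c'::'2'::'2'::rest) = '\\'::'2'::'2'::scanGo rest := by
  rw [scanGo]; simp [codeSet_eq, T2c, T1c]

lemma stepB26 (rest : List Char) :
    appF pats2 (appF pats1 ('\\'::'5'::'c'::'2'::'6'::rest)) = '\\'::'2'::'6'::appF pats2 (appF pats1 rest) := by
  simp only [appF, stepF, pats1, pats2, List.foldl]; simp [replF_cons, List.isPrefixOf]

lemma scanB26 (rest : List Char) :
    scanGo ('\\'::'5'::'c'::'2'::'6'::rest) = '\\'::'2'::'6'::scanGo rest := by
  rw [scanGo]; simp [codeSet_eq, T2c, T1c]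

lemma stepB27 (rest : List Char) :
    appF pats2 (appF pats1 ('\\'::'5'::'c'::'2'::'7'::rest)) = '\\'::'2'::'7'::appF pats2 (appF pats1 rest) := by
  simp only [appF, stepF, pats1, pats2, List.foldl]; simp [replF_cons, List.isPrefixOf]

lemma scanB27 (rest : List Char) :
    scanGo ('\\'::'5'::'c'::'2'::'7'::rest) = '\\'::'2'::'7'::scanGo rest := by
  rw [scanGo]; simp [codeSet_eq, T2c, T1c]

lemma stepB2f (rest : List Char) :
    appF pats2 (appF pats1 ('\\'::'5'::'c'::'2'::'f'::rest)) = '\\'::'2'::'f'::appF pats2 (appF pats1 rest) := by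
  simp only [appF, stepF, pats1, pats2, List.foldl]; simp [replF_cons, List.isPrefixOf]

lemma scanB2f (rest : List Char) :
    scanGo ('\\'::'5'::'c'::'2'::'f'::rest) = '\\'::'2'::'f'::scanGo rest := by
  rw [scanGo]; simp [codeSet_eq, T2c, T1c]

lemma stepB3a (rest : List Char) :
    appF pats2 (appF pats1 ('\\'::'5'::'c'::'3'::'a'::rest)) = '\\'::'3'::'a'::appF pats2 (appF pats1 rest) := by
  simp only [appF, stepF, pats1, pats2, List.foldl]; simp [replF_cons, List.isPrefixOf]

lemma scanB3a (rest : List Char) :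
    scanGo ('\\'::'5'::'c'::'3'::'a'::rest) = '\\'::'3'::'a'::scanGo rest := by
  rw [scanGo]; simp [codeSet_eq, T2c, T1c]

lemma stepB3c (rest : List Char) :
    appF pats2 (appF pats1 ('\\'::'5'::'c'::'3'::'c'::rest)) = '\\'::'3'::'c'::appF pats2 (appF pats1 rest) := by
  simp only [appF, stepF, pats1, pats2, List.foldl]; simp [replF_cons, List.isPrefixOf]

lemma scanB3c (rest : List Char) :
    scanGo ('\\'::'5'::'c'::'3'::'c'::rest) = '\\'::'3'::'c'::scanGo rest := by
  rw [scanGo]; simp [codeSet_eq, T2c, T1c]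

lemma stepB3e (rest : List Char) :
    appF pats2 (appF pats1 ('\\'::'5'::'c'::'3'::'e'::rest)) = '\\'::'3'::'e'::appF pats2 (appF pats1 rest) := by
  simp only [appF, stepF, pats1, pats2, List.foldl]; simp [replF_cons, List.isPrefixOf]

lemma scanB3e (rest : List Char) :
    scanGo ('\\'::'5'::'c'::'3'::'e'::rest) = '\\'::'3'::'e'::scanGo rest := by
  rw [scanGo]; simp [codeSet_eq, T2c, T1c]

lemma stepB40 (rest : List Char) :
    appF pats2 (appF pats1 ('\\'::'5'::'c'::'4'::'0'::rest)) = '\\'::'4'::'0'::appF pats2 (appF pats1 rest) := by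
  simp only [appF, stepF, pats1, pats2, List.foldl]; simp [replF_cons, List.isPrefixOf]

lemma scanB40 (rest : List Char) :
    scanGo ('\\'::'5'::'c'::'4'::'0'::rest) = '\\'::'4'::'0'::scanGo rest := by
  rw [scanGo]; simp [codeSet_eq, T2c, T1c]

lemma stepB5c (rest : List Char) :
    appF pats2 (appF pats1 ('\\'::'5'::'c'::'5'::'c'::rest)) = '\\'::'5'::'c'::appF pats2 (appF pats1 rest) := by
  simp only [appF, stepF, pats1, pats2, List.foldl]; simp [replF_cons, List.isPrefixOf]

lemma scanB5c (rest : List Char) :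
    scanGo ('\\'::'5'::'c'::'5'::'c'::rest) = '\\'::'5'::'c'::scanGo rest := by
  rw [scanGo]; simp [codeSet_eq, T2c, T1c]

lemma stepC20 (rest : List Char) :
    appF pats2 (appF pats1 ('\\'::'2'::'0'::rest)) = ' '::appF pats2 (appF pats1 rest) := by
  simp only [appF, stepF, pats1, pats2, List.foldl]; simp [replF_cons, List.isPrefixOf]

lemma scanC20 (rest : List Char) :
    scanGo ('\\'::'2'::'0'::rest) = ' '::scanGo rest := by
  rw [scanGo]; simp [codeSet_eq, bareTable_eq, PySem.Dict.get?_mk_cons]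

lemma stepC22 (rest : List Char) :
    appF pats2 (appF pats1 ('\\'::'2'::'2'::rest)) = '"'::appF pats2 (appF pats1 rest) := by
  simp only [appF, stepF, pats1, pats2, List.foldl]; simp [replF_cons, List.isPrefixOf]

lemma scanC22 (rest : List Char) :
    scanGo ('\\'::'2'::'2'::rest) = '"'::scanGo rest := by
  rw [scanGo]; simp [codeSet_eq, bareTable_eq, PySem.Dict.get?_mk_cons]

lemma stepC26 (rest : List Char) :
    appF pats2 (appF pats1 ('\\'::'2'::'6'::rest)) = '&'::appF pats2 (appF pats1 rest) := by
  simp only [appF, stepF, pats1, pats2, List.foldl]; simp [replF_cons, List.isPrefixOf]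

lemma scanC26 (rest : List Char) :
    scanGo ('\\'::'2'::'6'::rest) = '&'::scanGo rest := by
  rw [scanGo]; simp [codeSet_eq, bareTable_eq, PySem.Dict.get?_mk_cons]

lemma stepC27 (rest : List Char) :
    appF pats2 (appF pats1 ('\\'::'2'::'7'::rest)) = '\''::appF pats2 (appF pats1 rest) := by
  simp only [appF, stepF, pats1, pats2, List.foldl]; simp [replF_cons, List.isPrefixOf]

lemma scanC27 (rest : List Char) :
    scanGo ('\\'::'2'::'7'::rest) = '\''::scanGo rest := by
  rw [scanGo]; simp [codeSet_eq, bareTable_eq, PySem.Dict.get?_mk_cons]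

lemma stepC2f (rest : List Char) :
    appF pats2 (appF pats1 ('\\'::'2'::'f'::rest)) = '/'::appF pats2 (appF pats1 rest) := by
  simp only [appF, stepF, pats1, pats2, List.foldl]; simp [replF_cons, List.isPrefixOf]

lemma scanC2f (rest : List Char) :
    scanGo ('\\'::'2'::'f'::rest) = '/'::scanGo rest := by
  rw [scanGo]; simp [codeSet_eq, bareTable_eq, PySem.Dict.get?_mk_cons]

lemma stepC3a (rest : List Char) :
    appF pats2 (appF pats1 ('\\'::'3'::'a'::rest)) = ':'::appF pats2 (appF pats1 rest) := by
  simp only [appF, stepF, pats1, pats2, List.foldl]; simp [replF_cons, List.isPrefixOf]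

lemma scanC3a (rest : List Char) :
    scanGo ('\\'::'3'::'a'::rest) = ':'::scanGo rest := by
  rw [scanGo]; simp [codeSet_eq, bareTable_eq, PySem.Dict.get?_mk_cons]

lemma stepC3c (rest : List Char) :
    appF pats2 (appF pats1 ('\\'::'3'::'c'::rest)) = '<'::appF pats2 (appF pats1 rest) := by
  simp only [appF, stepF, pats1, pats2, List.foldl]; simp [replF_cons, List.isPrefixOf]

lemma scanC3c (rest : List Char) :
    scanGo ('\\'::'3'::'c'::rest) = '<'::scanGo rest := by
  rw [scanGo]; simp [codeSet_eq, bareTable_eq, PySem.Dict.get?_mk_cons]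

lemma stepC3e (rest : List Char) :
    appF pats2 (appF pats1 ('\\'::'3'::'e'::rest)) = '>'::appF pats2 (appF pats1 rest) := by
  simp only [appF, stepF, pats1, pats2, List.foldl]; simp [replF_cons, List.isPrefixOf]

lemma scanC3e (rest : List Char) :
    scanGo ('\\'::'3'::'e'::rest) = '>'::scanGo rest := by
  rw [scanGo]; simp [codeSet_eq, bareTable_eq, PySem.Dict.get?_mk_cons]

lemma stepC40 (rest : List Char) :
    appF pats2 (appF pats1 ('\\'::'4'::'0'::rest)) = '@'::appF pats2 (appF pats1 rest) := by
  simp only [appF, stepF, pats1, pats2, List.foldl]; simp [replF_cons, List.isPrefixOf]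

lemma scanC40 (rest : List Char) :
    scanGo ('\\'::'4'::'0'::rest) = '@'::scanGo rest := by
  rw [scanGo]; simp [codeSet_eq, bareTable_eq, PySem.Dict.get?_mk_cons]


lemma scanGo_nil : scanGo [] = [] := by rw [scanGo]

lemma scanD (t : List Char)
    (hg1 : ¬ (t.take 2 = ['5','c'] ∧ (t.drop 2).take 2 ∈ codeSet))
    (hget : PySem.Dict.get? bareTable (t.take 2) = none) :
    scanGo ('\\'::t) = '\\' :: scanGo t := by
  rw [scanGo]
  simp [hg1, hget]

lemma scan_ne (c : Char) (t : List Char) (hc : c ≠ '\\') :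
    scanGo (c::t) = c :: scanGo t := by
  rw [scanGo]; simp [hc]

lemma main_equiv : ∀ n (l : List Char), l.length ≤ n →
    appF pats2 (appF pats1 l) = scanGo l := by
  intro n
  induction n with
  | zero =>
    intro l h
    have hl : l = [] := by cases l <;> simp_all
    subst hl
    simp [appF, stepF, pats1, pats2, List.foldl, replF_nil, scanGo_nil]
  | succ n ih =>
    intro l h
    cases l with
    | nil => simp [appF, stepF, pats1, pats2, List.foldl, replF_nil, scanGo_nil]
    | cons c t =>
      by_cases hc : c = '\\'
      · subst hc
        by_cases hg1 : (t.take 2 = ['5','c'] ∧ (t.drop 2).take 2 ∈ codeSet)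
        · obtain ⟨h5c, hmem⟩ := hg1
          have htt := List.take_append_drop 2 t
          rw [h5c] at htt
          generalize hrest : t.drop 2 = t2 at htt
          subst htt
          simp only [List.cons_append, List.nil_append] at hmem h ⊢
          rw [codeSet_eq] at hmem
          simp only [List.drop_succ_cons, List.drop_zero] at hmem
          rcases t2 with _ | ⟨x, t3⟩
          · simp [T2c, T1c] at hmem
          rcases t3 with _ | ⟨y, rest⟩
          · simp [T2c, T1c] at hmem
          simp only [List.take_succ_cons, List.take_zero, T2c, T1c, List.cons_append,
            List.nil_append, List.mem_cons, List.not_mem_nil, or_false] at hmem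
          simp only [List.length_cons] at h
          rcases hmem with h'|h'|h'|h'|h'|h'|h'|h'|h'|h' <;>
            (simp only [List.cons.injEq, and_true] at h'; obtain ⟨rfl, rfl⟩ := h')
          all_goals first
            | rw [stepB20, scanB20, ih rest (by omega)]
            | rw [stepB22, scanB22, ih rest (by omega)]
            | rw [stepB26, scanB26, ih rest (by omega)]
            | rw [stepB27, scanB27, ih rest (by omega)]
            | rw [stepB2f, scanB2f, ih rest (by omega)]
            | rw [stepB3a, scanB3a, ih rest (by omega)]
            | rw [stepB3c, scanB3c, ih rest (by omega)]
            | rw [stepB3e, scanB3e, ih rest (by omega)]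
            | rw [stepB40, scanB40, ih rest (by omega)]
            | rw [stepB5c, scanB5c, ih rest (by omega)]
        · cases hget : PySem.Dict.get? bareTable (t.take 2) with
          | some r =>
            have hd := bare_get _ _ hget
            rcases hd with ⟨hq,rfl⟩|⟨hq,rfl⟩|⟨hq,rfl⟩|⟨hq,rfl⟩|⟨hq,rfl⟩|⟨hq,rfl⟩|⟨hq,rfl⟩|⟨hq,rfl⟩|⟨hq,rfl⟩ <;>
              (have htt := List.take_append_drop 2 t
               rw [hq] at htt
               generalize hrest : t.drop 2 = rest at htt
               subst htt
               simp only [List.cons_append, List.nil_append, List.length_cons] at h ⊢)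
            all_goals first
              | rw [stepC20, scanC20, ih rest (by omega)]
              | rw [stepC22, scanC22, ih rest (by omega)]
              | rw [stepC26, scanC26, ih rest (by omega)]
              | rw [stepC27, scanC27, ih rest (by omega)]
              | rw [stepC2f, scanC2f, ih rest (by omega)]
              | rw [stepC3a, scanC3a, ih rest (by omega)]
              | rw [stepC3c, scanC3c, ih rest (by omega)]
              | rw [stepC3e, scanC3e, ih rest (by omega)]
              | rw [stepC40, scanC40, ih rest (by omega)]
          | none =>
            have hJ1 : J1 t := by
              intro cd hcd hpre
              rw [List.prefix_iff_eq_take] at hpre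
              fin_cases hcd <;>
                (simp only [List.length_cons, List.length_nil] at hpre
                 rw [← hpre] at hget
                 exact absurd hget (by decide))
            have hK : K2 t := by
              intro cd hcd hpre
              apply hg1
              obtain ⟨v, rfl⟩ := hpre
              obtain ⟨x, y, rfl, _, _⟩ := T2c_shape cd hcd
              refine ⟨by simp, ?_⟩
              simp only [List.cons_append, List.drop_succ_cons, List.drop_zero,
                List.take_succ_cons, List.take_zero, List.nil_append]
              rw [codeSet_eq]
              exact hcd
            have hcomm := appF1_commute pats1 goods1 t hJ1 hK
            rw [hcomm.1, appF2_commute pats2 goods2 _ hcomm.2.2,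
              ih t (by simp at h; omega), scanD t hg1 hget]
      · rw [appF_cons_ne pats1 goods12 c t hc,
          appF_cons_ne pats2 goods22 c (appF pats1 t) hc,
          ih t (by simp at h; omega), scan_ne c t hc]

-- ===== VERDICT (by name: the statement is the Claim_ definition above) =====
theorem jid_unescape_spec : Claim_equal_jid_unescape := by
  intro s _
  unfold Spec_jid_unescape jid_unescape_alt
  rw [A_bridge]
  exact congrArg String.ofList (main_equiv s.toList.length s.toList (le_refl _))
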